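-- pv_equiv track=rewrite | github.com/jamie-jjd/2021_spring_introduction_to_data_structure | practice/13/solution.py | Check
-- ===== SOURCE A (Python) =====
-- class Trie:
--     class Node:
--         def __init__ (self):
--             self.children = {}
--
--     def __init__ (self):
--         self.root = self.Node()
--
--     def Insert (self, suffix):
--         node = self.root
--         for character in suffix:
--             if character not in node.children:
--                 node.children[character] = self.Node()
--             node = node.children[character]
--
--     def Check (self, string):
--         node = self.root
--         for character in string:
--             if character not in node.children:
--                 return 0
--             node = node.children[character]
--         return 1
--
-- def Check (N, m, Ms):
--     trie = Trie()
--     responses = []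
--     for i in range(len(N)):
--         trie.Insert(N[i:])
--     for M in Ms:
--         responses.append(trie.Check(M))
--     return responses
-- ===== SOURCE B (Python) =====
-- def Check(N, m, Ms):
--     return [1 if M in N else 0 for M in Ms]
-- ===== Notes on version B (the rewrite author's own statement) =====
-- stated objective: faster
-- what changed: Replaces the O(n^2) suffix-trie build plus per-query trie walk with a direct substring test ('M in N') per query, removing the trie entirely.
import Mathlib
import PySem

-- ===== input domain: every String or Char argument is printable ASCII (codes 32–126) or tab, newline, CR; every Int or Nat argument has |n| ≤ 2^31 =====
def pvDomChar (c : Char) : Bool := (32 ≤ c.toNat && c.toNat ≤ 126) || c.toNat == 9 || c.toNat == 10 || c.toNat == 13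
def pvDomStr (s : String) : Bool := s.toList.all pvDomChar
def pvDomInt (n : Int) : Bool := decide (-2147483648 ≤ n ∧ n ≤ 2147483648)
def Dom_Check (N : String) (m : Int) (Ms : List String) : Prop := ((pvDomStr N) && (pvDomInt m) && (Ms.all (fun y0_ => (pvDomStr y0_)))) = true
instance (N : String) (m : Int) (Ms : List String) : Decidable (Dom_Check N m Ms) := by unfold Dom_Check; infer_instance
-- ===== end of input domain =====

-- B replaces A's O(n^2) suffix-trie build (+ per-query trie walk) with a direct
-- built-in substring test per query ('M in N'); same return value, no preprocessing.

-- ===== PORT A =====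
-- A's trie node holds a dict of children; encoded here (non-nested, kernel-checkable) in
-- first-child/next-sibling form: a TrieN is the CHILDREN LIST of a node
-- (nil = empty dict; node c child sib = entry c ↦ child followed by the remaining entries),
-- lookup = first matching key, new keys appended at the end — exactly dict semantics.
inductive TrieN : Type
  | nil : TrieN
  | node : Char → TrieN → TrieN → TrieN
deriving DecidableEq, Repr

-- Trie.Insert: walk the word, descending into the child for each character,
-- creating a fresh empty node where the dict has no entry.
def trieInsert : TrieN → List Char → TrieN
  | t, [] => t
  | .nil, c :: rest => .node c (trieInsert .nil rest) .nil
  | .node d ch sib, c :: rest =>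
      if d = c then .node d (trieInsert ch rest) sib
      else .node d ch (trieInsert sib (c :: rest))
termination_by t w => (w.length, sizeOf t)

-- Trie.Check: walk the word; 0 as soon as a character has no entry, else 1.
def trieCheck : TrieN → List Char → Int
  | _, [] => 1
  | .nil, _ :: _ => 0
  | .node d ch sib, c :: rest =>
      if d = c then trieCheck ch rest else trieCheck sib (c :: rest)
termination_by t w => (w.length, sizeOf t)

def Check (N : String) (m : Int) (Ms : List String) : List Int :=
  -- for i in range(len(N)): trie.Insert(N[i:])
  let trie := (PySem.List.pyRange 0 (PySem.Str.len N) 1).foldl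
      (fun t i => trieInsert t (PySem.Str.slice N (some i) none).toList) .nil
  -- for M in Ms: responses.append(trie.Check(M))
  Ms.foldl (fun acc M => acc ++ [trieCheck trie M.toList]) []

-- ===== PORT B =====
def Check_alt (N : String) (m : Int) (Ms : List String) : List Int :=
  Ms.map (fun M => if PySem.Str.isIn M N then 1 else 0)

-- ===== PRECONDITION & SPEC =====
def Spec_Check (N : String) (m : Int) (Ms : List String) (out : List Int) : Prop := out = Check_alt N m Ms
instance (N : String) (m : Int) (Ms : List String) (out : List Int) : Decidable (Spec_Check N m Ms out) := by unfold Spec_Check; infer_instance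

-- ===== CLAIM (what is proved, stated in full; the proofs are below) =====
def Claim_equal_Check : Prop := ∀ (N : String) (m : Int) (Ms : List String), Dom_Check N m Ms → Spec_Check N m Ms (Check N m Ms)

-- ===== LEMMAS AND PROOFS =====

-- Inserting w into a trie makes Check accept exactly the prefixes of w, on top of
-- whatever the trie accepted before.
theorem trieCheck_insert (t : TrieN) (w M : List Char) :
    trieCheck (trieInsert t w) M = if M <+: w then 1 else trieCheck t M := by
  induction t, w using trieInsert.induct generalizing M with
  | case1 t =>
      cases M <;> simp [trieInsert, trieCheck]
  | case2 c rest ih =>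
      cases M with
      | nil => simp [trieCheck]
      | cons d Ms' =>
          by_cases hd : d = c
          · subst hd
            simp [trieInsert, trieCheck, ih, List.cons_prefix_cons]
            by_cases hp : Ms' <+: rest
            · simp [hp]
            · simp [hp]
              cases Ms' with
              | nil => simp at hp
              | cons _ _ => simp [trieCheck]
          · simp [trieInsert, trieCheck, hd, List.cons_prefix_cons, Ne.symm hd]
  | case3 ch sib c rest ih =>
      cases M with
      | nil => simp [trieCheck]
      | cons e Ms' =>
          by_cases he : e = c
          · subst he
            simp [trieInsert, trieCheck, ih, List.cons_prefix_cons]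
          · simp [trieInsert, trieCheck, he, Ne.symm he, List.cons_prefix_cons]
  | case4 d ch sib c rest hdc ih =>
      cases M with
      | nil => simp [trieCheck]
      | cons e Ms' =>
          by_cases he : e = d
          · subst he
            simp [trieInsert, trieCheck, hdc, List.cons_prefix_cons]
          · simp [trieInsert, trieCheck, Ne.symm he, ih, hdc]

theorem trieCheck_nil_word (t : TrieN) : trieCheck t [] = 1 := by
  cases t <;> simp [trieCheck]

-- The trie built by inserting every word of L accepts M iff M is a prefix of some word of L
-- (or was accepted already).
theorem trieCheck_foldl (L : List (List Char)) (t : TrieN) (M : List Char) :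
    trieCheck (L.foldl trieInsert t) M
      = if ∃ w ∈ L, M <+: w then 1 else trieCheck t M := by
  induction L generalizing t with
  | nil => simp
  | cons a L ih =>
      simp only [List.foldl_cons, ih, trieCheck_insert, List.mem_cons]
      by_cases h1 : M <+: a
      · simp [h1]
      · simp only [h1, if_false]
        by_cases h2 : ∃ w ∈ L, M <+: w
        · obtain ⟨w, hw, hp⟩ := h2
          rw [if_pos ⟨w, hw, hp⟩, if_pos ⟨w, List.mem_cons_of_mem a hw, hp⟩]
        · rw [if_neg h2, if_neg (by
            rintro ⟨w, hw, hp⟩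
            rcases List.mem_cons.mp hw with rfl | hw
            · exact h1 hp
            · exact h2 ⟨w, hw, hp⟩)]

-- The suffix trie of N accepts M iff M is a substring of N ('M in N').
theorem trieCheck_suffixes (N M : List Char) :
    trieCheck ((List.range N.length).foldl (fun t k => trieInsert t (N.drop k)) .nil) M
      = if PySem.Chars.isIn M N then 1 else 0 := by
  have h := trieCheck_foldl ((List.range N.length).map (fun k => N.drop k)) .nil M
  rw [List.foldl_map] at h
  rw [h]
  cases M with
  | nil => simp [PySem.Chars.isIn_nil, trieCheck_nil_word]
  | cons c M' =>
      by_cases hin : PySem.Chars.isIn (c :: M') N = true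
      · rw [if_pos hin]
        obtain ⟨j, hj⟩ := (PySem.Chars.exists_prefix_drop_iff_isIn (c :: M') N).mpr hin
        have hjlt : j < N.length := by
          by_contra hge
          rw [List.drop_eq_nil_of_le (by omega)] at hj
          simp at hj
        exact if_pos ⟨N.drop j, List.mem_map_of_mem (List.mem_range.mpr hjlt), hj⟩
      · rw [if_neg hin]
        rw [if_neg (by
          rintro ⟨w, hw, hp⟩
          obtain ⟨k, hk, rfl⟩ := List.mem_map.mp hw
          exact hin ((PySem.Chars.exists_prefix_drop_iff_isIn (c :: M') N).mp ⟨k, hp⟩))]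
        simp [trieCheck]

-- A's insertion loop (pyRange over slices) is the fold over the suffix list of N.
theorem trie_build_eq (N : String) :
    (PySem.List.pyRange 0 (PySem.Str.len N) 1).foldl
        (fun t i => trieInsert t (PySem.Str.slice N (some i) none).toList) .nil
      = (List.range N.toList.length).foldl (fun t k => trieInsert t (N.toList.drop k)) .nil := by
  rw [PySem.Str.len_eq, PySem.List.pyRange_one, List.foldl_map]
  simp only [Int.sub_zero, Int.toNat_natCast]
  refine PySem.List.foldl_congr_mem _ _ _ _ (fun t k _ => ?_)
  have : (PySem.Str.slice N (some ((0 : Int) + (k : Int))) none).toList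
      = PySem.List.slice N.toList (some ((k : Nat) : Int)) none := by
    simp
  rw [this, PySem.List.slice_from_natCast]

theorem Check_eq_aux (N : String) (m : Int) (Ms : List String) :
    Check N m Ms = Check_alt N m Ms := by
  unfold Check Check_alt
  rw [PySem.List.foldl_append_singleton_eq_map, List.nil_append]
  refine List.map_congr_left (fun M _ => ?_)
  rw [trie_build_eq, trieCheck_suffixes, PySem.Str.isIn_eq]

-- ===== VERDICT (by name: the statement is the Claim_ definition above) =====
theorem Check_spec : Claim_equal_Check := by
  intro N m Ms _
  exact Check_eq_aux N m Ms
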